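-- pv_equiv track=rewrite | github.com/utkarshg6/SMVDU-HackerRank | Implementation/Q01 - Grading Students/python.py | solve
-- ===== SOURCE A (Python) =====
-- def solve(grades):
--     l = len(grades)
--     for i in range(l):
--         if grades[i] > 37:
--             j=0
--             while ( grades[i] > j ):      # Creates a roundoff value in variable j
--                 j += 5
--             if( j - grades[i] < 3 ):      # If the value of round off and j have difference smaller than 3 then the difference
--                 grades[i] = j             # will be transferred
--     return(grades)
-- ===== SOURCE B (Python) =====
-- def solve(grades):
--     # Closed-form rounding: next multiple of 5 via arithmetic, no incrementing loop.
--     # (A mutates its argument in place; B builds a new list -- return value is identical.)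
--     return [g + 5 - g % 5 if g > 37 and g % 5 >= 3 else g for g in grades]
-- ===== Notes on version B (the rewrite author's own statement) =====
-- stated objective: faster
-- what changed: Replaced the per-grade incrementing while-loop (j += 5 until j >= grade) and in-place index mutation with a single closed-form arithmetic expression (g + 5 - g % 5 when g > 37 and g % 5 >= 3) in one list comprehension.
import Mathlib
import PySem

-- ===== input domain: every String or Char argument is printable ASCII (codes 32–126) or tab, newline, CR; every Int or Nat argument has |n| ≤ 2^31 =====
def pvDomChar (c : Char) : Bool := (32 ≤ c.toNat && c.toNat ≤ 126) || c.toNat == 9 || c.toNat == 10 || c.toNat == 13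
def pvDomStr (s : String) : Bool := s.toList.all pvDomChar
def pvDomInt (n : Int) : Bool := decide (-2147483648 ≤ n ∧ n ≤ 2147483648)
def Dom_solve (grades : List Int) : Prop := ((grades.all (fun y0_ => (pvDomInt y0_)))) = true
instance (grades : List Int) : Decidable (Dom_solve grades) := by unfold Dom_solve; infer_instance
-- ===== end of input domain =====

-- B replaces A's per-grade incrementing while-loop with one closed-form arithmetic
-- expression (asymptotically faster). A mutates its argument in place; the equivalence
-- proved here is about the return value only.

-- ===== PORT A =====
-- the 'while grades[i] > j: j += 5' loop of A
def solveLoopJ (g j : Int) : Int :=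
  if g > j then solveLoopJ g (j + 5) else j
termination_by (g - j).toNat
decreasing_by omega

-- one iteration of A's 'for i in range(l)' body, acting on the current list
def solveStep (gs : List Int) (i : Nat) : List Int :=
  -- grades[i] (always in range in A) is gs.getD i 0; j is solveLoopJ (grades[i]) 0
  if gs.getD i 0 > 37 then
    if solveLoopJ (gs.getD i 0) 0 - gs.getD i 0 < 3 then
      gs.set i (solveLoopJ (gs.getD i 0) 0)
    else gs
  else gs

def solve (grades : List Int) : List Int :=
  (List.range grades.length).foldl solveStep grades

-- ===== PORT B =====
def solve_alt (grades : List Int) : List Int :=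
  grades.map (fun g => if g > 37 ∧ g % 5 ≥ 3 then g + 5 - g % 5 else g)

-- ===== PRECONDITION & SPEC =====
def Spec_solve (grades : List Int) (out : List Int) : Prop := out = solve_alt grades
instance (grades : List Int) (out : List Int) : Decidable (Spec_solve grades out) := by unfold Spec_solve; infer_instance

-- ===== CLAIM (what is proved, stated in full; the proofs are below) =====
def Claim_equal_solve : Prop := ∀ (grades : List Int), Dom_solve grades → Spec_solve grades (solve grades)

-- ===== LEMMAS AND PROOFS =====

-- A's per-element result, as a function of the single grade
def fElem (g : Int) : Int :=
  if g > 37 then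
    if solveLoopJ g 0 - g < 3 then solveLoopJ g 0 else g
  else g

theorem solveStep_length (gs : List Int) (i : Nat) :
    (solveStep gs i).length = gs.length := by
  unfold solveStep
  split_ifs <;> simp

theorem solveStep_append (gs : List Int) (a : Int) (i : Nat) (h : i < gs.length) :
    solveStep (gs ++ [a]) i = solveStep gs i ++ [a] := by
  unfold solveStep
  rw [List.getD_append _ _ _ _ h, List.set_append_left _ _ h]
  split_ifs <;> rfl

theorem foldl_solveStep_append (is : List Nat) (gs : List Int) (a : Int)
    (h : ∀ i ∈ is, i < gs.length) :
    is.foldl solveStep (gs ++ [a]) = is.foldl solveStep gs ++ [a] := by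
  induction is generalizing gs with
  | nil => rfl
  | cons i is ih =>
      simp only [List.foldl_cons]
      rw [solveStep_append gs a i (h i (by simp)), ih]
      intro k hk
      rw [solveStep_length]
      exact h k (by simp [hk])

theorem solveLoopJ_spec (g j : Int) (hm : j % 5 = 0) (hlt : j < g + 5) :
    (solveLoopJ g j) % 5 = 0 ∧ g ≤ solveLoopJ g j ∧ solveLoopJ g j < g + 5 := by
  induction j using solveLoopJ.induct (g := g) with
  | case1 j hj ih =>
      rw [solveLoopJ]; simp only [if_pos hj]
      exact ih (by omega) (by omega)
  | case2 j hj =>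
      rw [solveLoopJ]; simp only [if_neg hj]
      omega

theorem fElem_eq (g : Int) :
    fElem g = if g > 37 ∧ g % 5 ≥ 3 then g + 5 - g % 5 else g := by
  unfold fElem
  by_cases hg : g > 37
  · have h := solveLoopJ_spec g 0 (by decide) (by omega)
    simp only [if_pos hg]
    set r := solveLoopJ g 0 with hr
    have h5 : g % 5 = 0 ∨ g % 5 = 1 ∨ g % 5 = 2 ∨ g % 5 = 3 ∨ g % 5 = 4 := by omega
    split_ifs <;> omega
  · simp [hg]

theorem solveStep_last (L : List Int) (a : Int) :
    solveStep (L ++ [a]) L.length = L ++ [fElem a] := by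
  unfold solveStep fElem
  rw [List.getD_append_right _ _ _ _ le_rfl, Nat.sub_self]
  simp only [List.getD_cons_zero]
  split_ifs
  · rw [List.set_append_right _ _ le_rfl, Nat.sub_self]
    simp
  · rfl
  · rfl

theorem solve_eq_map (gs : List Int) :
    (List.range gs.length).foldl solveStep gs = gs.map fElem := by
  induction gs using List.reverseRecOn with
  | nil => rfl
  | append_singleton gs a ih =>
      have hstep := solveStep_last (gs.map fElem) a
      rw [List.length_map] at hstep
      rw [List.length_append, List.length_singleton, List.range_succ, List.foldl_append,
        foldl_solveStep_append _ _ _ (fun i hi => List.mem_range.mp hi), ih,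
        List.foldl_cons, List.foldl_nil, hstep, List.map_append, List.map_singleton]

-- ===== VERDICT (by name: the statement is the Claim_ definition above) =====
theorem solve_spec : Claim_equal_solve := by
  intro grades _
  unfold Spec_solve solve solve_alt
  rw [solve_eq_map]
  exact List.map_congr_left (fun g _ => fElem_eq g)
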